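-- pv_equiv track=rewrite | github.com/gzak25/recomovie | recommendation_functions.py | bfs_genre_exploration
-- ===== SOURCE A (Python) =====
-- from collections import deque
--
-- def bfs_genre_exploration(start_genre, genre_graph, max_depth):
--     """Performs BFS to explore genres up to a certain depth."""
--     goal_genres = []
--     while not goal_genres:
--         queue = deque()
--         queue.append((start_genre, 0))
--         explored_genres = [start_genre]
--         while queue:
--             current_genre, depth = queue.popleft()
--             if depth == max_depth:
--                 goal_genres.append(current_genre)
--                 explored_genres.append(current_genre)
--             elif depth > max_depth:
--                 continue
--             for neighbor in genre_graph.get(current_genre, []):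
--                 if neighbor not in explored_genres:
--                     explored_genres.append(neighbor)
--                     queue.append((neighbor, depth + 1))
--         if goal_genres == []:
--             max_depth -= 1
--     return goal_genres
-- ===== SOURCE B (Python) =====
-- def bfs_genre_exploration(start_genre, genre_graph, max_depth):
--     """One BFS building frontiers by comprehension + ordered dedup; index the level table once."""
--     seen = {start_genre}
--     levels = [[start_genre]]
--     while levels[-1]:
--         cand = [nb for g in levels[-1] for nb in genre_graph.get(g, []) if nb not in seen]
--         nxt = list(dict.fromkeys(cand))
--         seen.update(nxt)
--         levels.append(nxt)
--     levels.pop()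
--     target = min(max_depth, len(levels) - 1)
--     return list(levels[target])
-- ===== Notes on version B (the rewrite author's own statement) =====
-- stated objective: faster
-- what changed: A single BFS builds the whole level table by whole-frontier comprehension steps (neighbours of the frontier, filtered by a hash set and deduplicated in order), and the answer is levels[min(max_depth, deepest)]; A instead re-runs a full BFS with O(n) list membership for every decrement of max_depth.
import Mathlib
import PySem

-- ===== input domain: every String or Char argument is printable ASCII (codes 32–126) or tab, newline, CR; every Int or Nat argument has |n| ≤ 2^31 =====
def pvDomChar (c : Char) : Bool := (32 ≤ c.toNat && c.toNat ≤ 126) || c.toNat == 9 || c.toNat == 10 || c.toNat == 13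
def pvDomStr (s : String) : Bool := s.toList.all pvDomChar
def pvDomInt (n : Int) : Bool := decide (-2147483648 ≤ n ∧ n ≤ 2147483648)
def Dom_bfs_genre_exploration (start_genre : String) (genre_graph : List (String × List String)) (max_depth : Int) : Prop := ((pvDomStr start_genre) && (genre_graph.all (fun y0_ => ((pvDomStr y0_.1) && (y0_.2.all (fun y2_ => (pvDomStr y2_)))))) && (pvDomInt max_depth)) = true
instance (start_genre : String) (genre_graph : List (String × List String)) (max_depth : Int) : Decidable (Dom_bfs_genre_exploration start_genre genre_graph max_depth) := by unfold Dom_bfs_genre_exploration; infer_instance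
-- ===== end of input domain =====

-- B replaces A's "re-run a per-node BFS for each decrement of max_depth" by one BFS whose
-- frontiers are built wholesale (comprehension + ordered dedup) and indexed once (objective: faster).

-- genre_graph.get(g, []) — transliteration of the dict lookup both Pythons perform
def pvGetNbs (genre_graph : List (String × List String)) (g : String) : List String :=
  (PySem.Dict.mk genre_graph).getD g []

-- termination measure helper: number of neighbour values not yet explored
def pvUnseen (genre_graph : List (String × List String)) (e : List String) : Nat :=
  (PySem.List.dedup (genre_graph.flatMap Prod.snd)).countP (fun x => decide (x ∉ e))

theorem pvUnseen_mono (genre_graph : List (String × List String)) {e e' : List String}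
    (h : ∀ x, x ∈ e → x ∈ e') : pvUnseen genre_graph e' ≤ pvUnseen genre_graph e := by
  apply List.countP_mono_left
  intro a _ ha
  simp only [decide_eq_true_eq] at *
  exact fun hm => ha (h a hm)

theorem countP_notMem_append_singleton {l e : List String} {x : String}
    (hn : l.Nodup) (hx : x ∈ l) (hne : x ∉ e) :
    l.countP (fun y => decide (y ∉ e ++ [x])) + 1 = l.countP (fun y => decide (y ∉ e)) := by
  induction l with
  | nil => cases hx
  | cons a l ih =>
    rcases List.nodup_cons.mp hn with ⟨hal, hl⟩
    simp only [List.countP_cons]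
    rcases List.mem_cons.mp hx with rfl | hx'
    · have hcong : List.countP (fun y => decide (y ∉ e ++ [x])) l
          = List.countP (fun y => decide (y ∉ e)) l := by
        apply List.countP_congr
        intro b hb
        have hbx : b ≠ x := fun h => hal (h ▸ hb)
        simp [hbx]
      simp only [hne, not_false_eq_true, decide_true, if_true]
      have : (if decide (x ∉ e ++ [x]) = true then 1 else 0) = 0 := by simp
      rw [this]
      omega
    · have hax : a ≠ x := fun h => hal (h ▸ hx')
      have hih := ih hl hx'
      have h2 : (if decide (a ∉ e ++ [x]) = true then 1 else 0)
          = (if decide (a ∉ e) = true then 1 else 0) := by simp [hax]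
      omega

theorem pvUnseen_append_singleton (genre_graph : List (String × List String)) {e : List String}
    {x : String} (hxU : x ∈ genre_graph.flatMap Prod.snd) (hxe : x ∉ e) :
    pvUnseen genre_graph (e ++ [x]) + 1 = pvUnseen genre_graph e := by
  unfold pvUnseen
  exact countP_notMem_append_singleton (PySem.List.nodup_dedup _)
    ((PySem.List.mem_dedup _ _).mpr hxU) hxe

-- ===== PORT A =====
-- inner "for neighbor in genre_graph.get(current_genre, []): …" loop of A
def pnA (nbs : List String) (e : List String) (q : List (String × Int)) (d : Int) :
    List String × List (String × Int) :=
  match nbs with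
  | [] => (e, q)
  | nb :: rest =>
    if nb ∈ e then pnA rest e q d
    else pnA rest (e ++ [nb]) (q ++ [(nb, d + 1)]) d

theorem pnA_meas (genre_graph : List (String × List String)) :
    ∀ (nbs e : List String) (q : List (String × Int)) (d : Int),
    (∀ x ∈ nbs, x ∈ genre_graph.flatMap Prod.snd) →
    (pnA nbs e q d).2.length + 2 * pvUnseen genre_graph (pnA nbs e q d).1 ≤
      q.length + 2 * pvUnseen genre_graph e := by
  intro nbs
  induction nbs with
  | nil => intro e q d _; simp [pnA]
  | cons nb rest ih =>
    intro e q d hU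
    have hnbU : nb ∈ genre_graph.flatMap Prod.snd := hU nb (by simp)
    have hrest : ∀ x ∈ rest, x ∈ genre_graph.flatMap Prod.snd := fun x hx => hU x (by simp [hx])
    by_cases h : nb ∈ e
    · simpa [pnA, h] using ih e q d hrest
    · have := ih (e ++ [nb]) (q ++ [(nb, d + 1)]) d hrest
      have hdrop := pvUnseen_append_singleton genre_graph hnbU h
      simp only [pnA, if_neg h]
      simp only [List.length_append, List.length_singleton] at this ⊢
      omega

theorem pvGetNbs_subset (genre_graph : List (String × List String)) (g : String) :
    ∀ x ∈ pvGetNbs genre_graph g, x ∈ genre_graph.flatMap Prod.snd := by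
  unfold pvGetNbs
  induction genre_graph with
  | nil => simp [PySem.Dict.getD, PySem.Dict.get?]
  | cons p rest ih =>
    intro x hx
    rw [PySem.Dict.getD_eq_get?_getD, PySem.Dict.get?_mk_cons] at hx
    by_cases h : p.1 == g
    · rw [if_pos h] at hx
      simp only [Option.getD_some] at hx
      exact List.mem_flatMap.mpr ⟨p, by simp, hx⟩
    · rw [if_neg h] at hx
      rw [← PySem.Dict.getD_eq_get?_getD] at hx
      have := ih x hx
      simp only [List.flatMap_cons, List.mem_append]
      right; exact this

-- the "while queue:" loop of A (queue, explored_genres, goal_genres)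
def bfsLoopA (genre_graph : List (String × List String)) (m : Int) :
    List (String × Int) → List String → List String → List String
  | [], _, goal => goal
  | (cur, d) :: qrest, e, goal =>
    if d = m then
      let r := pnA (pvGetNbs genre_graph cur) (e ++ [cur]) qrest d
      bfsLoopA genre_graph m r.2 r.1 (goal ++ [cur])
    else if m < d then
      bfsLoopA genre_graph m qrest e goal
    else
      let r := pnA (pvGetNbs genre_graph cur) e qrest d
      bfsLoopA genre_graph m r.2 r.1 goal
termination_by q e _ => q.length + 2 * pvUnseen genre_graph e
decreasing_by
  · have h1 := pnA_meas genre_graph (pvGetNbs genre_graph cur) (e ++ [cur]) qrest d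
      (pvGetNbs_subset genre_graph cur)
    have h2 := pvUnseen_mono genre_graph (e := e) (e' := e ++ [cur]) (fun x hx => by simp [hx])
    simp only [List.length_cons]
    omega
  · simp only [List.length_cons]; omega
  · have h1 := pnA_meas genre_graph (pvGetNbs genre_graph cur) e qrest d
      (pvGetNbs_subset genre_graph cur)
    simp only [List.length_cons]
    omega

-- the outer "while not goal_genres: … max_depth -= 1" loop of A; for max_depth < 0 the Python
-- loops forever, so outside Pre_ the port returns [] via the 'd ≤ 0' totality guard
def outerA (start_genre : String) (genre_graph : List (String × List String)) (d : Int) :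
    List String :=
  let goal := bfsLoopA genre_graph d [(start_genre, 0)] [start_genre] []
  if goal = [] then
    if d ≤ 0 then [] else outerA start_genre genre_graph (d - 1)
  else goal
termination_by d.toNat
decreasing_by omega

def bfs_genre_exploration (start_genre : String) (genre_graph : List (String × List String)) (max_depth : Int) : List String :=
  outerA start_genre genre_graph max_depth

-- ===== PORT B =====
-- "cand = [nb for g in levels[-1] for nb in genre_graph.get(g, []) if nb not in seen];
--  nxt = list(dict.fromkeys(cand))" — one whole frontier built by comprehension + ordered dedup
def pvFrontier (genre_graph : List (String × List String)) (seen : PySem.Set String)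
    (lvl : List String) : List String :=
  PySem.List.dedup ((lvl.flatMap (fun g => pvGetNbs genre_graph g)).filter
    (fun nb => !PySem.Set.contains seen nb))

theorem pvUnseen_append (genre_graph : List (String × List String)) :
    ∀ (nxt e : List String), nxt.Nodup → (∀ x ∈ nxt, x ∉ e) →
    (∀ x ∈ nxt, x ∈ genre_graph.flatMap Prod.snd) →
    pvUnseen genre_graph (e ++ nxt) + nxt.length = pvUnseen genre_graph e := by
  intro nxt
  induction nxt with
  | nil => intro e _ _ _; simp
  | cons x xs ih =>
    intro e hn hne hU
    rcases List.nodup_cons.mp hn with ⟨hxxs, hxs⟩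
    have h1 := pvUnseen_append_singleton genre_graph (hU x (by simp)) (hne x (by simp))
    have h2 := ih (e ++ [x]) hxs
      (fun y hy => by
        simp only [List.mem_append, List.mem_singleton]
        rintro (hy' | rfl)
        · exact hne y (by simp [hy]) hy'
        · exact hxxs hy)
      (fun y hy => hU y (by simp [hy]))
    rw [List.append_cons]
    simp only [List.length_cons]
    omega

theorem update_append : ∀ (nxt seen : List String), nxt.Nodup → (∀ x ∈ nxt, x ∉ seen) →
    PySem.Set.update seen nxt = seen ++ nxt := by
  intro nxt
  induction nxt with
  | nil => intro seen _ _; simp [PySem.Set.update]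
  | cons x xs ih =>
    intro seen hn hne
    rcases List.nodup_cons.mp hn with ⟨hxxs, hxs⟩
    have hadd : PySem.Set.add seen x = seen ++ [x] :=
      PySem.Set.add_of_not_mem (hne x (by simp))
    have := ih (seen ++ [x]) hxs
      (fun y hy => by
        simp only [List.mem_append, List.mem_singleton]
        rintro (hy' | rfl)
        · exact hne y (by simp [hy]) hy'
        · exact hxxs hy)
    simp only [PySem.Set.update, List.foldl_cons, hadd]
    rw [show List.foldl PySem.Set.add (seen ++ [x]) xs = PySem.Set.update (seen ++ [x]) xs from rfl,
      this]
    simp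

theorem pvFrontier_nodup (genre_graph : List (String × List String)) (seen : PySem.Set String)
    (lvl : List String) : (pvFrontier genre_graph seen lvl).Nodup :=
  PySem.List.nodup_dedup _

theorem pvFrontier_not_mem (genre_graph : List (String × List String)) (seen : PySem.Set String)
    (lvl : List String) : ∀ x ∈ pvFrontier genre_graph seen lvl, x ∉ seen := by
  intro x hx
  rw [pvFrontier, PySem.List.mem_dedup] at hx
  have := List.of_mem_filter hx
  simp only [Bool.not_eq_true', PySem.Set.contains] at this
  simpa using this

theorem pvFrontier_subset (genre_graph : List (String × List String)) (seen : PySem.Set String)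
    (lvl : List String) : ∀ x ∈ pvFrontier genre_graph seen lvl,
    x ∈ genre_graph.flatMap Prod.snd := by
  intro x hx
  rw [pvFrontier, PySem.List.mem_dedup] at hx
  have hmem := List.mem_of_mem_filter hx
  rcases List.mem_flatMap.mp hmem with ⟨g, _, hg⟩
  exact pvGetNbs_subset genre_graph g x hg

theorem buildLevels_meas (genre_graph : List (String × List String)) (seen : PySem.Set String)
    (lvl : List String) :
    2 * pvUnseen genre_graph (PySem.Set.update seen (pvFrontier genre_graph seen lvl)) +
      (if pvFrontier genre_graph seen lvl = [] then 0 else 1) <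
      2 * pvUnseen genre_graph seen + 1 := by
  have hupd := update_append (pvFrontier genre_graph seen lvl) seen
    (pvFrontier_nodup genre_graph seen lvl) (pvFrontier_not_mem genre_graph seen lvl)
  have hun := pvUnseen_append genre_graph (pvFrontier genre_graph seen lvl) seen
    (pvFrontier_nodup genre_graph seen lvl) (pvFrontier_not_mem genre_graph seen lvl)
    (pvFrontier_subset genre_graph seen lvl)
  rw [hupd]
  by_cases h : pvFrontier genre_graph seen lvl = []
  · rw [if_pos h]
    rw [h] at hun ⊢
    simp only [List.length_nil] at hun
    omega
  · rw [if_neg h]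
    have : 0 < (pvFrontier genre_graph seen lvl).length := List.length_pos_iff.mpr h
    omega

-- "while levels[-1]: … seen.update(nxt); levels.append(nxt)" of B
def buildLevels (genre_graph : List (String × List String)) (seen : PySem.Set String)
    (lvl : List String) (acc : List (List String)) : List (List String) :=
  if h : lvl = [] then acc
  else
    let nxt := pvFrontier genre_graph seen lvl
    buildLevels genre_graph (PySem.Set.update seen nxt) nxt (acc ++ [nxt])
termination_by 2 * pvUnseen genre_graph seen + (if lvl = [] then 0 else 1)
decreasing_by
  rw [if_neg h]
  exact buildLevels_meas genre_graph seen lvl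

def bfs_genre_exploration_alt (start_genre : String) (genre_graph : List (String × List String)) (max_depth : Int) : List String :=
  let seen : PySem.Set String := PySem.Set.ofList [start_genre]
  let levels := buildLevels genre_graph seen [start_genre] [[start_genre]]
  let levels := levels.dropLast    -- levels.pop(): drop the final empty level
  let target := min max_depth ((levels.length : Int) - 1)
  PySem.List.pyGetD levels target []   -- list(levels[target])

-- ===== PRECONDITION & SPEC =====
-- Pre_ excludes only max_depth < 0, where A's decrement loop never terminates (A returns on
-- every max_depth ≥ 0, which the claim covers in full).
def Pre_bfs_genre_exploration (start_genre : String) (genre_graph : List (String × List String)) (max_depth : Int) : Prop :=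
  0 ≤ max_depth
instance (start_genre : String) (genre_graph : List (String × List String)) (max_depth : Int) : Decidable (Pre_bfs_genre_exploration start_genre genre_graph max_depth) := by unfold Pre_bfs_genre_exploration; infer_instance

def pvWitness_bfs_genre_exploration : String × (List (String × List String)) × Int :=
  ("rock", [("rock", ["jazz", "pop"]), ("jazz", ["blues"])], 1)

def Spec_bfs_genre_exploration (start_genre : String) (genre_graph : List (String × List String)) (max_depth : Int) (out : List String) : Prop := out = bfs_genre_exploration_alt start_genre genre_graph max_depth
instance (start_genre : String) (genre_graph : List (String × List String)) (max_depth : Int) (out : List String) : Decidable (Spec_bfs_genre_exploration start_genre genre_graph max_depth out) := by unfold Spec_bfs_genre_exploration; infer_instance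

-- ===== CLAIM (what is proved, stated in full; the proofs are below) =====
def Claim_equal_bfs_genre_exploration : Prop := ∀ (start_genre : String) (genre_graph : List (String × List String)) (max_depth : Int), Dom_bfs_genre_exploration start_genre genre_graph max_depth → Pre_bfs_genre_exploration start_genre genre_graph max_depth → Spec_bfs_genre_exploration start_genre genre_graph max_depth (bfs_genre_exploration start_genre genre_graph max_depth)

-- ===== LEMMAS AND PROOFS =====

-- the new elements A's inner loop appends, as a function of the neighbour list and explored
def newE (nbs e : List String) : List String :=
  match nbs with
  | [] => []
  | nb :: rest => if nb ∈ e then newE rest e else nb :: newE rest (e ++ [nb])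

theorem pnA_char : ∀ (nbs e : List String) (q : List (String × Int)) (d : Int),
    pnA nbs e q d = (e ++ newE nbs e, q ++ (newE nbs e).map (fun y => (y, d + 1))) := by
  intro nbs
  induction nbs with
  | nil => intro e q d; simp [pnA, newE]
  | cons nb rest ih =>
    intro e q d
    by_cases h : nb ∈ e
    · simp [pnA, newE, h, ih]
    · simp only [pnA, newE, if_neg h, ih]
      simp

theorem newE_append : ∀ (xs ys e : List String),
    newE (xs ++ ys) e = newE xs e ++ newE ys (e ++ newE xs e) := by
  intro xs
  induction xs with
  | nil => intro ys e; simp [newE]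
  | cons x xs' ih =>
    intro ys e
    by_cases h : x ∈ e
    · simp only [List.cons_append, newE, if_pos h]
      exact ih ys e
    · simp only [List.cons_append, newE, if_neg h, ih ys (e ++ [x])]
      rw [List.append_cons e x (newE xs' (e ++ [x]))]

-- A's per-node expansion of one whole level (proof-only view)
def levelNew (genre_graph : List (String × List String)) : List String → List String → List String
  | [], _ => []
  | g :: gs, e =>
    newE (pvGetNbs genre_graph g) e ++
      levelNew genre_graph gs (e ++ newE (pvGetNbs genre_graph g) e)

theorem levelNew_eq (genre_graph : List (String × List String)) :
    ∀ (lvl e : List String),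
    levelNew genre_graph lvl e = newE (lvl.flatMap (fun g => pvGetNbs genre_graph g)) e := by
  intro lvl
  induction lvl with
  | nil => intro e; simp [levelNew, newE]
  | cons g gs ih =>
    intro e
    simp only [levelNew, List.flatMap_cons, newE_append, ih]

theorem newE_foldl (seen0 : List String) : ∀ (nbs e acc : List String),
    (∀ x, x ∈ e ↔ (x ∈ seen0 ∨ x ∈ acc)) →
    (nbs.filter (fun nb => !PySem.Set.contains seen0 nb)).foldl PySem.Set.add acc
      = acc ++ newE nbs e := by
  intro nbs
  induction nbs with
  | nil => intro e acc _; simp [newE]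
  | cons nb rest ih =>
    intro e acc hm
    by_cases hs : nb ∈ seen0
    · have he : nb ∈ e := (hm nb).mpr (Or.inl hs)
      have hc : PySem.Set.contains seen0 nb = true := by
        simp [PySem.Set.contains, hs]
      have hf : List.filter (fun nb => !PySem.Set.contains seen0 nb) (nb :: rest)
          = List.filter (fun nb => !PySem.Set.contains seen0 nb) rest := by
        rw [List.filter_cons, hc]
        simp
      rw [hf]
      simp only [newE, if_pos he]
      exact ih e acc hm
    · have hc : PySem.Set.contains seen0 nb = false := by
        simp [PySem.Set.contains, hs]
      by_cases ha : nb ∈ acc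
      · have he : nb ∈ e := (hm nb).mpr (Or.inr ha)
        have hadd : PySem.Set.add acc nb = acc := by
          simp [PySem.Set.add, PySem.Set.contains, ha]
        have hf : List.filter (fun nb => !PySem.Set.contains seen0 nb) (nb :: rest)
            = nb :: List.filter (fun nb => !PySem.Set.contains seen0 nb) rest := by
          rw [List.filter_cons, hc]
          simp
        rw [hf]
        simp only [List.foldl_cons, hadd, newE, if_pos he]
        exact ih e acc hm
      · have he : nb ∉ e := fun h => by rcases (hm nb).mp h with h' | h' <;> [exact hs h'; exact ha h']
        have hadd : PySem.Set.add acc nb = acc ++ [nb] := PySem.Set.add_of_not_mem ha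
        have hm' : ∀ x, x ∈ e ++ [nb] ↔ (x ∈ seen0 ∨ x ∈ acc ++ [nb]) := by
          intro x
          simp only [List.mem_append, List.mem_singleton, hm x]
          tauto
        have hf : List.filter (fun nb => !PySem.Set.contains seen0 nb) (nb :: rest)
            = nb :: List.filter (fun nb => !PySem.Set.contains seen0 nb) rest := by
          rw [List.filter_cons, hc]
          simp
        rw [hf]
        simp only [List.foldl_cons, hadd, newE, if_neg he]
        rw [ih (e ++ [nb]) (acc ++ [nb]) hm']
        simp

theorem pvFrontier_eq (genre_graph : List (String × List String)) (seen : PySem.Set String)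
    (lvl e : List String) (hm : ∀ x, x ∈ e ↔ x ∈ seen) :
    pvFrontier genre_graph seen lvl = levelNew genre_graph lvl e := by
  rw [pvFrontier, PySem.List.dedup_eq_ofList, PySem.Set.ofList_eq_foldl,
    levelNew_eq genre_graph lvl e,
    newE_foldl seen (lvl.flatMap (fun g => pvGetNbs genre_graph g)) e []
      (fun x => by simpa using hm x)]
  simp

-- proof-only view of B's level construction: the list of (nonempty) BFS levels
def chainB (genre_graph : List (String × List String)) (seen : PySem.Set String)
    (lvl : List String) : List (List String) :=
  if h : lvl = [] then []
  else
    let nxt := pvFrontier genre_graph seen lvl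
    lvl :: chainB genre_graph (PySem.Set.update seen nxt) nxt
termination_by 2 * pvUnseen genre_graph seen + (if lvl = [] then 0 else 1)
decreasing_by
  rw [if_neg h]
  exact buildLevels_meas genre_graph seen lvl

theorem chainB_nil (genre_graph : List (String × List String)) (seen : PySem.Set String) :
    chainB genre_graph seen [] = [] := by
  rw [chainB, dif_pos rfl]

theorem chainB_cons (genre_graph : List (String × List String)) (seen : PySem.Set String)
    {lvl : List String} (h : lvl ≠ []) :
    chainB genre_graph seen lvl = lvl :: chainB genre_graph
      (PySem.Set.update seen (pvFrontier genre_graph seen lvl))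
      (pvFrontier genre_graph seen lvl) := by
  rw [chainB]
  simp only [dif_neg h]

theorem chainB_ne_nil (genre_graph : List (String × List String)) :
    ∀ (seen : PySem.Set String) (lvl : List String), ∀ l ∈ chainB genre_graph seen lvl, l ≠ [] := by
  intro seen lvl
  induction seen, lvl using chainB.induct genre_graph with
  | case1 seen => intro l hl; rw [chainB_nil] at hl; cases hl
  | case2 seen lvl h nxt ih =>
    intro l hl
    have hnxt : nxt = pvFrontier genre_graph seen lvl := rfl
    rw [hnxt] at ih
    rw [chainB_cons genre_graph seen h] at hl
    rcases List.mem_cons.mp hl with rfl | hl'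
    · exact h
    · exact ih l hl'

theorem buildLevels_nil (genre_graph : List (String × List String)) (seen : PySem.Set String)
    (acc : List (List String)) : buildLevels genre_graph seen [] acc = acc := by
  rw [buildLevels, dif_pos rfl]

theorem buildLevels_cons (genre_graph : List (String × List String)) (seen : PySem.Set String)
    {lvl : List String} (h : lvl ≠ []) (acc : List (List String)) :
    buildLevels genre_graph seen lvl acc = buildLevels genre_graph
      (PySem.Set.update seen (pvFrontier genre_graph seen lvl))
      (pvFrontier genre_graph seen lvl) (acc ++ [pvFrontier genre_graph seen lvl]) := by
  rw [buildLevels]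
  simp only [dif_neg h]

theorem buildLevels_eq_chainB (genre_graph : List (String × List String)) :
    ∀ (seen : PySem.Set String) (lvl : List String) (acc : List (List String)),
    buildLevels genre_graph seen lvl (acc ++ [lvl]) =
      acc ++ chainB genre_graph seen lvl ++ [[]] := by
  intro seen lvl
  induction seen, lvl using chainB.induct genre_graph with
  | case1 seen =>
    intro acc
    rw [buildLevels_nil, chainB_nil]
    simp
  | case2 seen lvl h nxt ih =>
    intro acc
    have hnxt : nxt = pvFrontier genre_graph seen lvl := rfl
    rw [hnxt] at ih
    rw [buildLevels_cons genre_graph seen h, chainB_cons genre_graph seen h]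
    rw [ih (acc ++ [lvl])]
    simp

theorem drain (genre_graph : List (String × List String)) (m : Int) :
    ∀ (q : List (String × Int)) (e goal : List String),
    (∀ x ∈ q, m < x.2) → bfsLoopA genre_graph m q e goal = goal := by
  intro q
  induction q with
  | nil => intro e goal _; rw [bfsLoopA]
  | cons x qrest ih =>
    intro e goal hq
    obtain ⟨cur, d⟩ := x
    have hd : m < d := hq (cur, d) (by simp)
    rw [bfsLoopA, if_neg (by omega), if_pos hd]
    exact ih e goal (fun y hy => hq y (by simp [hy]))

theorem collect (genre_graph : List (String × List String)) (m : Int) :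
    ∀ (s : List String) (q : List (String × Int)) (e goal : List String),
    (∀ x ∈ q, x.2 = m + 1) →
    bfsLoopA genre_graph m (s.map (fun y => (y, m)) ++ q) e goal = goal ++ s := by
  intro s
  induction s with
  | nil =>
    intro q e goal hq
    simp only [List.map_nil, List.nil_append, List.append_nil]
    exact drain genre_graph m q e goal (fun x hx => by rw [hq x hx]; omega)
  | cons cur s' ih =>
    intro q e goal hq
    simp only [List.map_cons, List.cons_append]
    rw [bfsLoopA, if_pos rfl]
    simp only [pnA_char]
    rw [List.append_assoc]
    have hq' : ∀ x ∈ q ++ (newE (pvGetNbs genre_graph cur) (e ++ [cur])).map (fun y => (y, m + 1)),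
        x.2 = m + 1 := by
      intro x hx
      rcases List.mem_append.mp hx with hx | hx
      · exact hq x hx
      · rcases List.mem_map.mp hx with ⟨y, _, rfl⟩; rfl
    rw [ih _ _ _ hq']
    simp

theorem processLevel (genre_graph : List (String × List String)) (m : Int) :
    ∀ (lvl p e goal : List String) (j : Int), j < m →
    bfsLoopA genre_graph m (lvl.map (fun y => (y, j)) ++ p.map (fun y => (y, j + 1))) e goal =
      bfsLoopA genre_graph m ((p ++ levelNew genre_graph lvl e).map (fun y => (y, j + 1)))
        (e ++ levelNew genre_graph lvl e) goal := by
  intro lvl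
  induction lvl with
  | nil => intro p e goal j _; simp [levelNew]
  | cons cur s' ih =>
    intro p e goal j hj
    simp only [List.map_cons, List.cons_append]
    rw [bfsLoopA, if_neg (by omega), if_neg (by omega)]
    simp only [pnA_char]
    have hq : List.map (fun y => (y, j)) s' ++ List.map (fun y => (y, j + 1)) p ++
        List.map (fun y => (y, j + 1)) (newE (pvGetNbs genre_graph cur) e)
        = List.map (fun y => (y, j)) s' ++
          List.map (fun y => (y, j + 1)) (p ++ newE (pvGetNbs genre_graph cur) e) := by
      simp [List.map_append]
    rw [hq, ih (p ++ newE (pvGetNbs genre_graph cur) e) (e ++ newE (pvGetNbs genre_graph cur) e)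
      goal j hj]
    simp only [levelNew, List.append_assoc]

theorem levelsLemma (genre_graph : List (String × List String)) (m : Int) :
    ∀ (n : Nat) (lvl e : List String) (seen : PySem.Set String) (goal : List String) (j : Int),
    j ≤ m → (m - j).toNat ≤ n → (∀ x, x ∈ e ↔ x ∈ seen) →
    bfsLoopA genre_graph m (lvl.map (fun y => (y, j))) e goal =
      goal ++ (chainB genre_graph seen lvl).getD (m - j).toNat [] := by
  intro n
  induction n with
  | zero =>
    intro lvl e seen goal j hj hn _
    have hjm : j = m := by omega
    subst hjm
    have h0 : (j - j).toNat = 0 := by omega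
    rw [h0, ← List.append_nil (lvl.map (fun y => (y, j))),
      collect genre_graph j lvl [] e goal (by simp)]
    cases hl : lvl with
    | nil => rw [chainB_nil]; simp
    | cons a l =>
      rw [← hl, chainB_cons genre_graph seen (by simp [hl])]
      simp
  | succ n ihn =>
    intro lvl e seen goal j hj hn hm
    by_cases hjm : j = m
    · subst hjm
      have h0 : (j - j).toNat = 0 := by omega
      rw [h0, ← List.append_nil (lvl.map (fun y => (y, j))),
        collect genre_graph j lvl [] e goal (by simp)]
      cases hl : lvl with
      | nil => rw [chainB_nil]; simp
      | cons a l =>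
        rw [← hl, chainB_cons genre_graph seen (by simp [hl])]
        simp
    · have hjlt : j < m := lt_of_le_of_ne hj hjm
      cases hl : lvl with
      | nil =>
        rw [chainB_nil]
        simp [bfsLoopA]
      | cons a l =>
        rw [← hl]
        have hlne : lvl ≠ [] := by simp [hl]
        have hpl := processLevel genre_graph m lvl [] e goal j hjlt
        simp only [List.map_nil, List.append_nil, List.nil_append] at hpl
        rw [hpl]
        have hfr : pvFrontier genre_graph seen lvl = levelNew genre_graph lvl e :=
          pvFrontier_eq genre_graph seen lvl e hm
        have hupd : PySem.Set.update seen (pvFrontier genre_graph seen lvl)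
            = seen ++ pvFrontier genre_graph seen lvl :=
          update_append _ _ (pvFrontier_nodup genre_graph seen lvl)
            (pvFrontier_not_mem genre_graph seen lvl)
        have hm' : ∀ x, x ∈ e ++ levelNew genre_graph lvl e ↔
            x ∈ PySem.Set.update seen (pvFrontier genre_graph seen lvl) := by
          intro x
          rw [hupd, hfr]
          simp [hm x]
        have hcall := ihn (levelNew genre_graph lvl e) (e ++ levelNew genre_graph lvl e)
          (PySem.Set.update seen (pvFrontier genre_graph seen lvl)) goal (j + 1)
          (by omega) (by omega) hm'
        rw [hcall, chainB_cons genre_graph seen hlne, hfr]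
        have hidx : (m - j).toNat = (m - (j + 1)).toNat + 1 := by omega
        rw [hidx, List.getD_cons_succ]

theorem singleBFS (genre_graph : List (String × List String)) (start_genre : String)
    (m : Int) (hm : 0 ≤ m) :
    bfsLoopA genre_graph m [(start_genre, 0)] [start_genre] [] =
      (chainB genre_graph (PySem.Set.ofList [start_genre]) [start_genre]).getD m.toNat [] := by
  have hmem : ∀ x, x ∈ [start_genre] ↔ x ∈ PySem.Set.ofList [start_genre] := by
    intro x; rw [PySem.Set.mem_ofList]
  have h := levelsLemma genre_graph m m.toNat [start_genre] [start_genre]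
    (PySem.Set.ofList [start_genre]) [] 0 hm (by omega) hmem
  simp only [List.map_cons, List.map_nil, List.nil_append] at h
  rw [h]
  have : (m - 0).toNat = m.toNat := by omega
  rw [this]

theorem outer_eq (start_genre : String) (genre_graph : List (String × List String)) :
    ∀ (n : Nat) (d : Int), 0 ≤ d → d.toNat ≤ n →
    outerA start_genre genre_graph d =
      (chainB genre_graph (PySem.Set.ofList [start_genre]) [start_genre]).getD
        (min d (((chainB genre_graph (PySem.Set.ofList [start_genre]) [start_genre]).length : Int) - 1)).toNat [] := by
  intro n
  set cl := chainB genre_graph (PySem.Set.ofList [start_genre]) [start_genre] with hcl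
  have hne : cl ≠ [] := by
    rw [hcl, chainB_cons genre_graph _ (by simp)]
    simp
  have hlen : 0 < cl.length := List.length_pos_iff.mpr hne
  induction n with
  | zero =>
    intro d hd hdn
    have hd0 : d = 0 := by omega
    subst hd0
    rw [outerA, singleBFS genre_graph start_genre 0 le_rfl, ← hcl]
    simp only [Int.toNat_zero]
    have hgd : cl.getD 0 [] ≠ [] := by
      rw [List.getD_eq_getElem cl [] (by omega)]
      exact chainB_ne_nil genre_graph _ _ _ (List.getElem_mem _)
    rw [if_neg hgd]
    have hmin : min (0:Int) ((cl.length : Int) - 1) = 0 := by omega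
    rw [hmin]
    simp
  | succ n ihn =>
    intro d hd hdn
    rw [outerA, singleBFS genre_graph start_genre d hd, ← hcl]
    by_cases hin : d.toNat < cl.length
    · have hgd : cl.getD d.toNat [] ≠ [] := by
        rw [List.getD_eq_getElem cl [] hin]
        exact chainB_ne_nil genre_graph _ _ _ (List.getElem_mem _)
      rw [if_neg hgd]
      have : min d ((cl.length : Int) - 1) = d := by omega
      rw [this]
    · have hgd : cl.getD d.toNat [] = [] := List.getD_eq_default cl [] (by omega)
      rw [if_pos hgd, if_neg (by omega : ¬ d ≤ 0)]
      rw [ihn (d - 1) (by omega) (by omega)]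
      have : min (d - 1) ((cl.length : Int) - 1) = min d ((cl.length : Int) - 1) := by omega
      rw [this]

theorem alt_eq (start_genre : String) (genre_graph : List (String × List String))
    (d : Int) (hd : 0 ≤ d) :
    bfs_genre_exploration_alt start_genre genre_graph d =
      (chainB genre_graph (PySem.Set.ofList [start_genre]) [start_genre]).getD
        (min d (((chainB genre_graph (PySem.Set.ofList [start_genre]) [start_genre]).length : Int) - 1)).toNat [] := by
  set cl := chainB genre_graph (PySem.Set.ofList [start_genre]) [start_genre] with hcl
  have hne : cl ≠ [] := by
    rw [hcl, chainB_cons genre_graph _ (by simp)]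
    simp
  have hlen : 0 < cl.length := List.length_pos_iff.mpr hne
  unfold bfs_genre_exploration_alt
  have hbl : buildLevels genre_graph (PySem.Set.ofList [start_genre]) [start_genre]
      [[start_genre]] = cl ++ [[]] := by
    have := buildLevels_eq_chainB genre_graph (PySem.Set.ofList [start_genre]) [start_genre] []
    simpa using this
  simp only [hbl, List.dropLast_concat]
  have hmin0 : 0 ≤ min d ((cl.length : Int) - 1) := by omega
  have hminlt : min d ((cl.length : Int) - 1) < (cl.length : Int) := by omega
  rw [PySem.List.pyGetD_eq_getElem cl ([]:List String) hmin0 hminlt]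
  rw [List.getD_eq_getElem cl [] (by omega)]

-- ===== VERDICT (by name: the statement is the Claim_ definition above) =====
theorem bfs_genre_exploration_spec : Claim_equal_bfs_genre_exploration := by
  intro start_genre genre_graph max_depth _ hpre
  have hd : (0:Int) ≤ max_depth := hpre
  unfold Spec_bfs_genre_exploration
  unfold bfs_genre_exploration
  rw [outer_eq start_genre genre_graph max_depth.toNat max_depth hd le_rfl,
    alt_eq start_genre genre_graph max_depth hd]
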